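-- pv_equiv track=rewrite | github.com/diog0010/reminder-bot | src/bot.py | parse_time_notation
-- ===== SOURCE A (Python) =====
-- def parse_time_notation(notation: str) -> tuple:
--     """Separate a time notation string into its various units."""
--     days, hours, minutes, seconds = 0, 0, 0, 0
--
--     notation = notation.split(':')
--
--     for i in range(len(notation)):
--         if i == 0:
--             seconds = int(notation[len(notation)-(1+i)])
--         elif i == 1:
--             minutes = int(notation[len(notation)-(1+i)])
--         elif i == 2:
--             hours = int(notation[len(notation)-(1+i)])
--         elif i == 3:
--             days = int(notation[len(notation)-(1+i)])
--
--     return (seconds, minutes, hours, days)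
-- ===== SOURCE B (Python) =====
-- def parse_time_notation(notation: str) -> tuple:
--     """Separate a time notation string into its various units."""
--     # single forward pass: a 4-slot shift register of raw fields
--     # (days, hours, minutes, seconds), pre-filled with '0'
--     window = ('0', '0', '0', '0')
--     for field in notation.split(':'):
--         window = (window[1], window[2], window[3], field)
--     return (int(window[3]), int(window[2]), int(window[1]), int(window[0]))
-- ===== Notes on version B (the rewrite author's own statement) =====
-- stated objective: alternative
-- what changed: Replaces A's reverse-indexed loop with four if/elif branches by a single forward pass maintaining a 4-slot sliding-window (shift-register) of raw field strings, parsing only the final window, so later fields automatically displace earlier ones and exactly the last four fields are int-parsed.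
-- outside the precondition, e.g. on parse_time_notation(':'): A raises ValueError, B raises ValueError
import Mathlib
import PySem

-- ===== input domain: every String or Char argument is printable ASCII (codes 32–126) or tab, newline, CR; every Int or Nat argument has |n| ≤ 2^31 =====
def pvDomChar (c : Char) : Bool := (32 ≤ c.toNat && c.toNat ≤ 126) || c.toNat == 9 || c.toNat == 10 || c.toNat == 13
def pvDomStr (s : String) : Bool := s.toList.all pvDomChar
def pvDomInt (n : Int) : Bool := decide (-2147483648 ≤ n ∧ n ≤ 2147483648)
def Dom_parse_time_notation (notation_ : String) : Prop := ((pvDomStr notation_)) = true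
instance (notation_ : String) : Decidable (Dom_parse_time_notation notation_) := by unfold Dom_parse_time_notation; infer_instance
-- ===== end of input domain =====

-- B replaces A's reverse-indexed 4-branch loop by a single forward pass over the fields
-- maintaining a 4-slot shift register of raw field strings, parsed only at the end.

-- ===== PORT A =====
-- int(notation[len(notation)-(1+i)])  (ValueError → Pre_ below; getD only fills the excluded case)
def pvField (parts : List String) (i : Int) : Int :=
  (PySem.Int.ofStr? ((PySem.List.pyGet? parts ((parts.length : Int) - (1 + i))).getD "")).getD 0

-- one iteration of A's loop body, state (days, hours, minutes, seconds)
def pvStepA (parts : List String) (st : Int × Int × Int × Int) (i : Int) : Int × Int × Int × Int :=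
  let (days, hours, minutes, seconds) := st
  if i = 0 then (days, hours, minutes, pvField parts i)
  else if i = 1 then (days, hours, pvField parts i, seconds)
  else if i = 2 then (days, pvField parts i, minutes, seconds)
  else if i = 3 then (pvField parts i, hours, minutes, seconds)
  else st

def pvAcore (parts : List String) : Int × Int × Int × Int :=
  let st := (PySem.List.pyRange 0 (parts.length : Int) 1).foldl (pvStepA parts) (0, 0, 0, 0)
  (st.2.2.2, st.2.2.1, st.2.1, st.1)

def parse_time_notation (notation_ : String) : Int × Int × Int × Int :=
  pvAcore ((PySem.Str.split? notation_ ":").getD [])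

-- ===== PORT B =====
-- window = (window[1], window[2], window[3], field)
def pvShift (w : String × String × String × String) (f : String) :
    String × String × String × String :=
  (w.2.1, w.2.2.1, w.2.2.2, f)

-- int(x)  (ValueError excluded by Pre_)
def pvInt (x : String) : Int := (PySem.Int.ofStr? x).getD 0

def pvBcore (parts : List String) : Int × Int × Int × Int :=
  let w := parts.foldl pvShift ("0", "0", "0", "0")
  (pvInt w.2.2.2, pvInt w.2.2.1, pvInt w.2.1, pvInt w.1)

def parse_time_notation_alt (notation_ : String) : Int × Int × Int × Int :=
  pvBcore ((PySem.Str.split? notation_ ":").getD [])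

-- ===== PRECONDITION & SPEC =====
-- Pre_ excludes exactly the inputs on which Python A raises ValueError: one of the
-- last (up to) four ':'-separated fields does not parse as an int.
def Pre_parse_time_notation (notation_ : String) : Prop :=
  ∀ f ∈ ((PySem.Str.split? notation_ ":").getD []).reverse.take 4, (PySem.Int.ofStr? f).isSome = true
instance (notation_ : String) : Decidable (Pre_parse_time_notation notation_) := by
  unfold Pre_parse_time_notation; infer_instance
def pvWitness_parse_time_notation : String := "1:02:3"

def Spec_parse_time_notation (notation_ : String) (out : Int × Int × Int × Int) : Prop := out = parse_time_notation_alt notation_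
instance (notation_ : String) (out : Int × Int × Int × Int) : Decidable (Spec_parse_time_notation notation_ out) := by unfold Spec_parse_time_notation; infer_instance

-- ===== CLAIM (what is proved, stated in full; the proofs are below) =====
def Claim_equal_parse_time_notation : Prop := ∀ (notation_ : String), Dom_parse_time_notation notation_ → Pre_parse_time_notation notation_ → Spec_parse_time_notation notation_ (parse_time_notation notation_)

-- ===== LEMMAS AND PROOFS =====

lemma pv_foldl_id {α β : Type} (f : α → β → α) (l : List β) (s : α)
    (h : ∀ b ∈ l, ∀ a, f a b = a) : l.foldl f s = s := by
  induction l generalizing s with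
  | nil => rfl
  | cons x xs ih =>
    rw [List.foldl_cons, h x (by simp)]
    exact ih s (fun b hb a => h b (by simp [hb]) a)

lemma pv_step_ge4 (parts : List String) (st : Int × Int × Int × Int) (i : Int) (hi : 4 ≤ i) :
    pvStepA parts st i = st := by
  obtain ⟨d, h, m, s⟩ := st
  simp only [pvStepA]
  rw [if_neg (by omega), if_neg (by omega), if_neg (by omega), if_neg (by omega)]

lemma pv_field_eq (parts : List String) (i : Int) (h0 : 0 ≤ i) (h : i < (parts.length : Int)) :
    pvField parts i = pvInt ((parts.reverse[i.toNat]?).getD "") := by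
  have h1 : ((parts.length : Int) - (1 + i)) = ((parts.length - 1 - i.toNat : Nat) : Int) := by omega
  have h2 : i.toNat < parts.length := by omega
  simp only [pvField, pvInt, h1, PySem.List.pyGet?_natCast, List.getElem?_reverse h2]

-- four consecutive shifts flush the window completely, whatever it held
lemma pv_shift_flush (w : String × String × String × String) (d c b a : String) :
    List.foldl pvShift w [d, c, b, a] = (d, c, b, a) := by
  obtain ⟨_, _, _, _⟩ := w
  rfl

lemma pv_zero : ((PySem.Int.ofStr? "0").getD 0 : Int) = 0 := by decide

lemma pv_core_eq (parts : List String) : pvAcore parts = pvBcore parts := by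
  rcases hr : parts.reverse with _ | ⟨a, _ | ⟨b, _ | ⟨c, _ | ⟨d, t⟩⟩⟩⟩
  · obtain rfl : parts = [] := by simpa using congrArg List.reverse hr
    decide
  · obtain rfl : parts = [a] := by simpa using congrArg List.reverse hr
    have hrg : PySem.List.pyRange 0 ((([a] : List String).length : Int)) 1 = [0] := by simp only [List.length_cons, List.length_nil]; decide
    simp only [pvAcore, pvBcore, hrg, List.foldl_cons, List.foldl_nil, pvShift]
    norm_num [pvStepA]
    rw [pv_field_eq [a] 0 (by norm_num) (by simp)]
    simp [hr, pvInt, pv_zero]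
  · obtain rfl : parts = [b, a] := by simpa using congrArg List.reverse hr
    have hrg : PySem.List.pyRange 0 ((([b, a] : List String).length : Int)) 1 = [0, 1] := by simp only [List.length_cons, List.length_nil]; decide
    simp only [pvAcore, pvBcore, hrg, List.foldl_cons, List.foldl_nil, pvShift]
    norm_num [pvStepA]
    rw [pv_field_eq [b, a] 0 (by norm_num) (by simp), pv_field_eq [b, a] 1 (by norm_num) (by simp)]
    simp [hr, pvInt, pv_zero]
  · obtain rfl : parts = [c, b, a] := by simpa using congrArg List.reverse hr
    have hrg : PySem.List.pyRange 0 ((([c, b, a] : List String).length : Int)) 1 = [0, 1, 2] := by simp only [List.length_cons, List.length_nil]; decide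
    simp only [pvAcore, pvBcore, hrg, List.foldl_cons, List.foldl_nil, pvShift]
    norm_num [pvStepA]
    rw [pv_field_eq [c, b, a] 0 (by norm_num) (by simp), pv_field_eq [c, b, a] 1 (by norm_num) (by simp),
      pv_field_eq [c, b, a] 2 (by norm_num) (by simp)]
    simp [hr, pvInt, pv_zero]
  · -- parts.reverse = a :: b :: c :: d :: t, so parts = t.reverse ++ [d, c, b, a]
    have hparts : parts = t.reverse ++ [d, c, b, a] := by
      have := congrArg List.reverse hr
      simpa using this
    have hlen : parts.length = t.length + 4 := by
      have h' := congrArg List.length hr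
      simp at h'
      omega
    have hsplit : PySem.List.pyRange 0 (parts.length : Int) 1 =
        PySem.List.pyRange 0 4 1 ++ PySem.List.pyRange 4 (parts.length : Int) 1 :=
      PySem.List.pyRange_one_append 0 4 (parts.length : Int) (by norm_num) (by omega)
    have h04 : PySem.List.pyRange 0 4 1 = [0, 1, 2, 3] := by decide
    have htail : ∀ st : Int × Int × Int × Int,
        (PySem.List.pyRange 4 (parts.length : Int) 1).foldl (pvStepA parts) st = st := by
      intro st
      refine pv_foldl_id _ _ _ ?_
      intro i hi st'
      exact pv_step_ge4 parts st' i ((PySem.List.mem_pyRange_one.mp hi).1)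
    have hB : parts.foldl pvShift ("0", "0", "0", "0") = (d, c, b, a) := by
      rw [hparts, List.foldl_append, pv_shift_flush]
    simp only [pvAcore, pvBcore, hsplit, h04, List.foldl_append, List.foldl_cons,
      List.foldl_nil, htail, hB]
    norm_num [pvStepA]
    rw [pv_field_eq parts 0 (by norm_num) (by omega), pv_field_eq parts 1 (by norm_num) (by omega),
      pv_field_eq parts 2 (by norm_num) (by omega), pv_field_eq parts 3 (by norm_num) (by omega)]
    simp [hr]

-- ===== VERDICT (by name: the statement is the Claim_ definition above) =====
theorem parse_time_notation_spec : Claim_equal_parse_time_notation := by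
  intro notation_ _ _
  unfold Spec_parse_time_notation parse_time_notation parse_time_notation_alt
  exact pv_core_eq _
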